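-- pv_equiv track=rewrite | github.com/ThenTech/BDA-Assignments | Plagiarism/Resources/submissions/submissions/2201977.py | cleanup_spaces
-- ===== SOURCE A (Python) =====
-- def cleanup_spaces(s):
--     words = ""
--     word = ""
--     s += "  "
--     for i in s:
--         if i != " ":
--             word += i
--         else:
--             if word != "":
--                 words += word + " "
--                 word = ""
--
--     return (words)
-- ===== SOURCE B (Python) =====
-- def cleanup_spaces(s):
--     return "".join(w + " " for w in s.split(" ") if w != "")
-- ===== Notes on version B (the rewrite author's own statement) =====
-- stated objective: idiomatic
-- what changed: Replaces the character-by-character state machine (with a two-space sentinel appended) by a tokenize-then-reassemble pass: split on a literal space, drop empty tokens, join each word with a trailing space.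
import Mathlib
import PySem

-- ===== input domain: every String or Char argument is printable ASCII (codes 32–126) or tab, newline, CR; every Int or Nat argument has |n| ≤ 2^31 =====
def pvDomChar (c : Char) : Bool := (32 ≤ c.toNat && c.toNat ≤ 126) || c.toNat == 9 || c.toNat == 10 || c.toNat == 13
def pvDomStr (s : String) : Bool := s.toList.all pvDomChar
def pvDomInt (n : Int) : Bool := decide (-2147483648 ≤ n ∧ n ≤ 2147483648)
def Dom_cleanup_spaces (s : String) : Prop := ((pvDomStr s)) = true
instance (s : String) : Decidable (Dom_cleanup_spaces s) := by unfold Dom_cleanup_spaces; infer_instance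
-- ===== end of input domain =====

-- B replaces A's character-by-character state machine by split-on-space / filter / join (idiomatic decomposition).


-- ===== PORT A =====
-- the loop body of A: state = (words, word); 'if i != " ": word += i else: if word != "": words += word + " "; word = ""'
def cleanupStep (st : List Char × List Char) (i : Char) : List Char × List Char :=
  if i ≠ ' ' then (st.1, st.2 ++ [i])
  else if st.2 ≠ [] then (st.1 ++ (st.2 ++ [' ']), []) else st

def cleanup_spaces (s : String) : String :=
  -- words = ""; word = ""; s += "  "; for i in s: …; return words
  String.ofList ((s.toList ++ [' ', ' ']).foldl cleanupStep ([], [])).1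

-- ===== PORT B =====
-- hand port of s.split(" ") (split on the literal single space), exact: tokens between spaces, empties kept
def splitSp : List Char → List (List Char)
  | [] => [[]]
  | c :: cs =>
    match splitSp cs with
    | [] => [[]]
    | t :: ts => if c = ' ' then [] :: t :: ts else (c :: t) :: ts

def cleanup_spaces_alt (s : String) : String :=
  -- "".join(w + " " for w in s.split(" ") if w != "")
  String.ofList (PySem.Chars.join []
    (((splitSp s.toList).filter (fun w => w ≠ [])).map (fun w => w ++ [' '])))

-- ===== PRECONDITION & SPEC =====
def Spec_cleanup_spaces (s : String) (out : String) : Prop := out = cleanup_spaces_alt s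
instance (s : String) (out : String) : Decidable (Spec_cleanup_spaces s out) := by unfold Spec_cleanup_spaces; infer_instance

-- ===== CLAIM (what is proved, stated in full; the proofs are below) =====
def Claim_equal_cleanup_spaces : Prop := ∀ (s : String), Dom_cleanup_spaces s → Spec_cleanup_spaces s (cleanup_spaces s)

-- ===== LEMMAS AND PROOFS =====

theorem join_nil_flatten (l : List (List Char)) : PySem.Chars.join [] l = l.flatten := by
  simp only [PySem.Chars.join, List.intercalate]
  induction l with
  | nil => simp
  | cons t ts ih =>
    cases ts with
    | nil => simp [List.intersperse]
    | cons u us => simpa [List.intersperse] using ih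

theorem splitSp_ne_nil (cs : List Char) : splitSp cs ≠ [] := by
  cases cs with
  | nil => simp [splitSp]
  | cons c cs =>
    simp only [splitSp]
    split
    · simp
    · split <;> simp

theorem splitSp_no_space (w : List Char) (h : ' ' ∉ w) : splitSp w = [w] := by
  induction w with
  | nil => rfl
  | cons c cs ih =>
    have hc : c ≠ ' ' := fun hc => h (hc ▸ List.mem_cons_self)
    have hr : splitSp cs = [cs] := ih (fun hm => h (List.mem_cons_of_mem _ hm))
    simp [splitSp, hr, hc]

theorem splitSp_append_space (w cs : List Char) (h : ' ' ∉ w) :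
    splitSp (w ++ ' ' :: cs) = w :: splitSp cs := by
  induction w with
  | nil =>
    rcases hcs : splitSp cs with _ | ⟨t, ts⟩
    · exact absurd hcs (splitSp_ne_nil cs)
    · simp [splitSp, hcs]
  | cons c w ih =>
    have hc : c ≠ ' ' := fun hc => h (hc ▸ List.mem_cons_self)
    have hrec := ih (fun hm => h (List.mem_cons_of_mem _ hm))
    simp only [List.cons_append, splitSp, hrec, if_neg hc]

-- B's value on a char list, as a flatten
def outB (cs : List Char) : List Char :=
  (((splitSp cs).filter (fun w => w ≠ [])).map (fun w => w ++ [' '])).flatten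

theorem outB_nil : outB [] = [] := by simp [outB, splitSp]

theorem outB_no_space (w : List Char) (h : ' ' ∉ w) :
    outB w = if w = [] then [] else w ++ [' '] := by
  rcases eq_or_ne w [] with hw | hw
  · subst hw; simp [outB_nil]
  · simp [outB, splitSp_no_space w h, hw]

theorem outB_cons_space (cs : List Char) : outB (' ' :: cs) = outB cs := by
  have h2 := splitSp_append_space [] cs (by simp)
  simp only [List.nil_append] at h2
  simp [outB, h2]

theorem outB_append_space (w cs : List Char) (h : ' ' ∉ w) (hw : w ≠ []) :
    outB (w ++ ' ' :: cs) = w ++ [' '] ++ outB cs := by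
  simp [outB, splitSp_append_space w cs h, hw]

theorem foldl_cleanupStep (cs : List Char) : ∀ (ws w : List Char), ' ' ∉ w →
    ((cs ++ [' ', ' ']).foldl cleanupStep (ws, w)).1 = ws ++ outB (w ++ cs) := by
  induction cs with
  | nil =>
    intro ws w h
    rcases eq_or_ne w [] with hw | hw
    · subst hw; simp [cleanupStep, outB_nil]
    · simp [cleanupStep, hw, outB_no_space w h]
  | cons c cs ih =>
    intro ws w h
    by_cases hc : c = ' '
    · subst hc
      rcases eq_or_ne w [] with hw | hw
      · subst hw
        have hstep : cleanupStep (ws, []) ' ' = (ws, []) := by simp [cleanupStep]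
        have hrec := ih ws [] (by simp)
        simp only [List.nil_append] at hrec
        simp only [List.cons_append, List.foldl_cons, hstep, List.nil_append, outB_cons_space]
        exact hrec
      · have hstep : cleanupStep (ws, w) ' ' = (ws ++ (w ++ [' ']), []) := by
          simp [cleanupStep, hw]
        have hrec := ih (ws ++ (w ++ [' '])) [] (by simp)
        simp only [List.nil_append] at hrec
        simp only [List.cons_append, List.foldl_cons, hstep]
        rw [hrec, outB_append_space w cs h hw]
        simp
    · have hmem : ' ' ∉ w ++ [c] := by
        intro hm
        rcases List.mem_append.mp hm with hm | hm
        · exact h hm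
        · simp at hm; exact hc hm.symm
      have hstep : cleanupStep (ws, w) c = (ws, w ++ [c]) := by
        simp [cleanupStep, hc]
      simp only [List.cons_append, List.foldl_cons, hstep]
      rw [ih ws (w ++ [c]) hmem]
      simp

-- ===== VERDICT (by name: the statement is the Claim_ definition above) =====
theorem cleanup_spaces_spec : Claim_equal_cleanup_spaces := by
  intro s _
  show _ = _
  unfold cleanup_spaces cleanup_spaces_alt
  rw [join_nil_flatten]
  have h := foldl_cleanupStep s.toList [] [] (by simp)
  simp only [List.nil_append] at h
  rw [h]
  rfl
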